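-- pv_equiv track=rewrite | github.com/michalhron/AI-futures | dashboard/data_utils.py | compatible_archetypes_for_stances
-- ===== SOURCE A (Python) =====
-- V2A_STANCED: dict[tuple[str, str], str] = {
--     ("Open Horizons, Unstable Ground", "Opening"): "Pioneer",
--     ("Open Horizons, Unstable Ground", "Mobilizing"): "Pioneer",
--     ("Open Horizons, Unstable Ground", "Normalizing"): "Pioneer",
--     ("Open Horizons, Unstable Ground", "Controlling"): "Guardian",
--     ("Empowered but Exposed", "Opening"): "Pioneer",
--     ("Empowered but Exposed", "Mobilizing"): "Builder",
--     ("Empowered but Exposed", "Normalizing"): "Guardian",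
--     ("Empowered but Exposed", "Controlling"): "Guardian",
--     ("Seamless but Concentrated", "Opening"): "Pioneer",
--     ("Seamless but Concentrated", "Mobilizing"): "Builder",
--     ("Seamless but Concentrated", "Normalizing"): "Pioneer",
--     ("Seamless but Concentrated", "Controlling"): "Guardian",
--     ("Transformed or Left Behind", "Opening"): "Pioneer",
--     ("Transformed or Left Behind", "Mobilizing"): "Builder",
--     ("Transformed or Left Behind", "Normalizing"): "Pioneer",
--     ("Transformed or Left Behind", "Controlling"): "Guardian",
--     ("Guided but Fragile", "Opening"): "Pioneer",
--     ("Guided but Fragile", "Mobilizing"): "Guardian",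
--     ("Guided but Fragile", "Normalizing"): "Guardian",
--     ("Guided but Fragile", "Controlling"): "Guardian",
-- }
--
-- def compatible_archetypes_for_stances(stances: set[str], vision: str) -> set[str] | None:
--     """
--     Archetypes that can appear together with at least one of the given stances under the table.
--     Returns None if `stances` is empty (no deprioritization).
--     """
--     if not stances:
--         return None
--     out: set[str] = set()
--     for (v, s), arch in V2A_STANCED.items():
--         if vision != "All" and v != vision:
--             continue
--         if s in stances:
--             out.add(arch)
--     return out
-- ===== SOURCE B (Python) =====
-- # Nested index written out once: vision -> {stance: archetype}; derived by hand
-- # from V2A_STANCED (same rows, grouped by vision in table order).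
-- _INDEX: dict[str, dict[str, str]] = {
--     "Open Horizons, Unstable Ground": {
--         "Opening": "Pioneer", "Mobilizing": "Pioneer",
--         "Normalizing": "Pioneer", "Controlling": "Guardian",
--     },
--     "Empowered but Exposed": {
--         "Opening": "Pioneer", "Mobilizing": "Builder",
--         "Normalizing": "Guardian", "Controlling": "Guardian",
--     },
--     "Seamless but Concentrated": {
--         "Opening": "Pioneer", "Mobilizing": "Builder",
--         "Normalizing": "Pioneer", "Controlling": "Guardian",
--     },
--     "Transformed or Left Behind": {
--         "Opening": "Pioneer", "Mobilizing": "Builder",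
--         "Normalizing": "Pioneer", "Controlling": "Guardian",
--     },
--     "Guided but Fragile": {
--         "Opening": "Pioneer", "Mobilizing": "Guardian",
--         "Normalizing": "Guardian", "Controlling": "Guardian",
--     },
-- }
--
--
-- def compatible_archetypes_for_stances(stances: set[str], vision: str) -> set[str] | None:
--     if not stances:
--         return None
--     if vision == "All":
--         subs = list(_INDEX.values())
--     elif vision in _INDEX:
--         subs = [_INDEX[vision]]
--     else:
--         subs = []
--     hits = [a for sub in subs for s, a in sub.items() if s in stances]
--     return set(hits)
-- ===== Notes on version B (the rewrite author's own statement) =====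
-- stated objective: alternative
-- what changed: B replaces A's per-call scan of the flat 20-row (vision,stance)->archetype table under a vision filter by a hand-written nested index vision->{stance:archetype}: it first selects the relevant submap(s) (all for 'All', one or none otherwise) and then collects the archetypes of the requested stances from those submaps only.
import Mathlib
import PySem

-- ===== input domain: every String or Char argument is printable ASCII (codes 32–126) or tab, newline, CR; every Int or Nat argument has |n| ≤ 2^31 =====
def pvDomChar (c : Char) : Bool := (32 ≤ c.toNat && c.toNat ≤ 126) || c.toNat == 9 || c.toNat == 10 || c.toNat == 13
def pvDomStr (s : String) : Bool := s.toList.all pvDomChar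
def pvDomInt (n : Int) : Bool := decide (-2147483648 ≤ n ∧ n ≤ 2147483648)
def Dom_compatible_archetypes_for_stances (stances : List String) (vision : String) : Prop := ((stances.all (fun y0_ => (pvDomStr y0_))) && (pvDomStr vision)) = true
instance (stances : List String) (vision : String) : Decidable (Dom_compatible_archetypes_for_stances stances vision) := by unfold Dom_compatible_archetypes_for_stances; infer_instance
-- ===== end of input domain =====

-- B replaces the per-call scan of the flat stance table by a hand-written nested
-- index vision -> {stance: archetype}, walking only the selected submap(s); alternative data structure, same exact result.


-- The shared module constant V2A_STANCED (insertion order of the Python dict)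
def pvV2A : List ((String × String) × String) := [
  (("Open Horizons, Unstable Ground", "Opening"), "Pioneer"),
  (("Open Horizons, Unstable Ground", "Mobilizing"), "Pioneer"),
  (("Open Horizons, Unstable Ground", "Normalizing"), "Pioneer"),
  (("Open Horizons, Unstable Ground", "Controlling"), "Guardian"),
  (("Empowered but Exposed", "Opening"), "Pioneer"),
  (("Empowered but Exposed", "Mobilizing"), "Builder"),
  (("Empowered but Exposed", "Normalizing"), "Guardian"),
  (("Empowered but Exposed", "Controlling"), "Guardian"),
  (("Seamless but Concentrated", "Opening"), "Pioneer"),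
  (("Seamless but Concentrated", "Mobilizing"), "Builder"),
  (("Seamless but Concentrated", "Normalizing"), "Pioneer"),
  (("Seamless but Concentrated", "Controlling"), "Guardian"),
  (("Transformed or Left Behind", "Opening"), "Pioneer"),
  (("Transformed or Left Behind", "Mobilizing"), "Builder"),
  (("Transformed or Left Behind", "Normalizing"), "Pioneer"),
  (("Transformed or Left Behind", "Controlling"), "Guardian"),
  (("Guided but Fragile", "Opening"), "Pioneer"),
  (("Guided but Fragile", "Mobilizing"), "Guardian"),
  (("Guided but Fragile", "Normalizing"), "Guardian"),
  (("Guided but Fragile", "Controlling"), "Guardian")]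

-- ===== PORT A =====
-- A: one fold over the flat table, skipping rows of other visions, Set.add per hit.
def compatible_archetypes_for_stances (stances : List String) (vision : String) : Option (List String) :=
  if stances.isEmpty then none
  else some (pvV2A.foldl (fun out row =>
    if vision != "All" && row.1.1 != vision then out       -- continue
    else if stances.contains row.1.2 then PySem.Set.add out row.2
    else out) PySem.Set.empty)

-- ===== PORT B =====
-- B: a hand-written nested index vision -> {stance: archetype} (Source B's _INDEX literal).
def pvIndex : PySem.Dict String (PySem.Dict String String) := PySem.Dict.mk [
  ("Open Horizons, Unstable Ground", PySem.Dict.mk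
    [("Opening", "Pioneer"), ("Mobilizing", "Pioneer"),
     ("Normalizing", "Pioneer"), ("Controlling", "Guardian")]),
  ("Empowered but Exposed", PySem.Dict.mk
    [("Opening", "Pioneer"), ("Mobilizing", "Builder"),
     ("Normalizing", "Guardian"), ("Controlling", "Guardian")]),
  ("Seamless but Concentrated", PySem.Dict.mk
    [("Opening", "Pioneer"), ("Mobilizing", "Builder"),
     ("Normalizing", "Pioneer"), ("Controlling", "Guardian")]),
  ("Transformed or Left Behind", PySem.Dict.mk
    [("Opening", "Pioneer"), ("Mobilizing", "Builder"),
     ("Normalizing", "Pioneer"), ("Controlling", "Guardian")]),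
  ("Guided but Fragile", PySem.Dict.mk
    [("Opening", "Pioneer"), ("Mobilizing", "Guardian"),
     ("Normalizing", "Guardian"), ("Controlling", "Guardian")])]

def compatible_archetypes_for_stances_alt (stances : List String) (vision : String) : Option (List String) :=
  if stances.isEmpty then none
  else
    let subs : List (PySem.Dict String String) :=
      if vision == "All" then pvIndex.values
      else match pvIndex.get? vision with
        | some sub => [sub]
        | none => []
    let hits : List String :=
      subs.flatMap (fun sub => (sub.items.filter (fun p => stances.contains p.1)).map Prod.snd)
    some (PySem.Set.ofList hits)

-- ===== PRECONDITION & SPEC =====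
def Spec_compatible_archetypes_for_stances (stances : List String) (vision : String) (out : Option (List String)) : Prop := out = compatible_archetypes_for_stances_alt stances vision
instance (stances : List String) (vision : String) (out : Option (List String)) : Decidable (Spec_compatible_archetypes_for_stances stances vision out) := by unfold Spec_compatible_archetypes_for_stances; infer_instance

-- ===== CLAIM =====
def Claim_equal_compatible_archetypes_for_stances : Prop := ∀ (stances : List String) (vision : String), Dom_compatible_archetypes_for_stances stances vision → Spec_compatible_archetypes_for_stances stances vision (compatible_archetypes_for_stances stances vision)

-- ===== LEMMAS AND PROOFS =====
theorem pv_eq (stances : List String) (vision : String) :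
    compatible_archetypes_for_stances stances vision = compatible_archetypes_for_stances_alt stances vision := by
  by_cases hE : stances.isEmpty
  · simp [compatible_archetypes_for_stances, compatible_archetypes_for_stances_alt, hE]
  · by_cases hAll : vision = "All"
    case pos =>
      subst hAll
      by_cases hO : "Opening" ∈ stances <;>
        by_cases hM : "Mobilizing" ∈ stances <;>
          by_cases hN : "Normalizing" ∈ stances <;>
            by_cases hC : "Controlling" ∈ stances <;>
              simp [compatible_archetypes_for_stances, compatible_archetypes_for_stances_alt,
                pvV2A, pvIndex, PySem.Dict.values, PySem.Set.ofList, PySem.Set.add,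
                PySem.Set.empty, hE, hO, hM, hN, hC]
    case neg =>
      by_cases h1 : vision = "Open Horizons, Unstable Ground"
      case pos =>
        subst h1
        by_cases hO : "Opening" ∈ stances <;>
          by_cases hM : "Mobilizing" ∈ stances <;>
            by_cases hN : "Normalizing" ∈ stances <;>
              by_cases hC : "Controlling" ∈ stances <;>
                simp [compatible_archetypes_for_stances, compatible_archetypes_for_stances_alt,
                  pvV2A, pvIndex, PySem.Dict.get?, PySem.Set.ofList, PySem.Set.add,
                  PySem.Set.empty, hE, hO, hM, hN, hC]
      case neg =>
        by_cases h2 : vision = "Empowered but Exposed"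
        case pos =>
          subst h2
          by_cases hO : "Opening" ∈ stances <;>
            by_cases hM : "Mobilizing" ∈ stances <;>
              by_cases hN : "Normalizing" ∈ stances <;>
                by_cases hC : "Controlling" ∈ stances <;>
                  simp [compatible_archetypes_for_stances, compatible_archetypes_for_stances_alt,
                    pvV2A, pvIndex, PySem.Dict.get?, PySem.Set.ofList, PySem.Set.add,
                    PySem.Set.empty, hE, hO, hM, hN, hC]
        case neg =>
          by_cases h3 : vision = "Seamless but Concentrated"
          case pos =>
            subst h3
            by_cases hO : "Opening" ∈ stances <;>
              by_cases hM : "Mobilizing" ∈ stances <;>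
                by_cases hN : "Normalizing" ∈ stances <;>
                  by_cases hC : "Controlling" ∈ stances <;>
                    simp [compatible_archetypes_for_stances, compatible_archetypes_for_stances_alt,
                      pvV2A, pvIndex, PySem.Dict.get?, PySem.Set.ofList, PySem.Set.add,
                      PySem.Set.empty, hE, hO, hM, hN, hC]
          case neg =>
            by_cases h4 : vision = "Transformed or Left Behind"
            case pos =>
              subst h4
              by_cases hO : "Opening" ∈ stances <;>
                by_cases hM : "Mobilizing" ∈ stances <;>
                  by_cases hN : "Normalizing" ∈ stances <;>
                    by_cases hC : "Controlling" ∈ stances <;>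
                      simp [compatible_archetypes_for_stances, compatible_archetypes_for_stances_alt,
                        pvV2A, pvIndex, PySem.Dict.get?, PySem.Set.ofList, PySem.Set.add,
                        PySem.Set.empty, hE, hO, hM, hN, hC]
            case neg =>
              by_cases h5 : vision = "Guided but Fragile"
              case pos =>
                subst h5
                by_cases hO : "Opening" ∈ stances <;>
                  by_cases hM : "Mobilizing" ∈ stances <;>
                    by_cases hN : "Normalizing" ∈ stances <;>
                      by_cases hC : "Controlling" ∈ stances <;>
                        simp [compatible_archetypes_for_stances, compatible_archetypes_for_stances_alt,
                          pvV2A, pvIndex, PySem.Dict.get?, PySem.Set.ofList, PySem.Set.add,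
                          PySem.Set.empty, hE, hO, hM, hN, hC]
              case neg =>
                -- vision matches nothing: A skips every row, B finds no submap
                simp [compatible_archetypes_for_stances, compatible_archetypes_for_stances_alt,
                  pvV2A, pvIndex, PySem.Dict.get?, PySem.Set.ofList, PySem.Set.empty,
                  List.foldl, hE, hAll, bne,
                  Ne.symm h1, Ne.symm h2, Ne.symm h3, Ne.symm h4, Ne.symm h5]

-- ===== VERDICT =====
theorem compatible_archetypes_for_stances_spec : Claim_equal_compatible_archetypes_for_stances := by
  intro stances vision _
  unfold Spec_compatible_archetypes_for_stances
  exact pv_eq stances vision
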